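-- pv_equiv track=rewrite | github.com/Kerybas/Lidilite | lidilite/tools.py | convert_to_sql_types
-- ===== SOURCE A (Python) =====
-- def convert_to_sql_types(keys_types):
--     """
--         Take the dict of unique types from give_keys_types, select the best type if
--         multiple types found, and return a dict of key:sql_type.
--
--     :param keys_types: (dict) a dictionary of key and a set of unique types found for that key.
--     :return: (dict) a dictionary of key and SQLite type.
--              Example: {'col1': 'TEXT', 'col2': 'REAL'}
--     """
--     keys_sql_types = {}
--     for key, types in keys_types.items():
--         if len(types) > 1 and types != {'int', 'float'}:
--             sql_type = 'TEXT'
--         elif types == {'int', 'float'} or types == {'float'}: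
--             sql_type = 'REAL'
--         elif types == {'int'} or types == {'boolean'}:
--             sql_type = 'INTEGER'
--         else:
--             sql_type = 'TEXT'
--
--         keys_sql_types[key] = sql_type
--
--     return keys_sql_types
-- ===== SOURCE B (Python) =====
-- def convert_to_sql_types(keys_types):
--     real_keys = {key for key, types in keys_types.items()
--                  if types in ({'float'}, {'int', 'float'})}
--     integer_keys = {key for key, types in keys_types.items()
--                     if types in ({'int'}, {'boolean'})}
--     return {key: 'REAL' if key in real_keys
--             else 'INTEGER' if key in integer_keys
--             else 'TEXT'
--             for key in keys_types}
-- ===== Notes on version B (the rewrite author's own statement) =====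
-- stated objective: alternative
-- what changed: Replaces A's single pass with a per-item if/elif cascade by staged passes: two set-comprehension passes collect the REAL-typed and INTEGER-typed key sets, then the result dict is built by key membership in those precomputed sets.
import Mathlib
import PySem

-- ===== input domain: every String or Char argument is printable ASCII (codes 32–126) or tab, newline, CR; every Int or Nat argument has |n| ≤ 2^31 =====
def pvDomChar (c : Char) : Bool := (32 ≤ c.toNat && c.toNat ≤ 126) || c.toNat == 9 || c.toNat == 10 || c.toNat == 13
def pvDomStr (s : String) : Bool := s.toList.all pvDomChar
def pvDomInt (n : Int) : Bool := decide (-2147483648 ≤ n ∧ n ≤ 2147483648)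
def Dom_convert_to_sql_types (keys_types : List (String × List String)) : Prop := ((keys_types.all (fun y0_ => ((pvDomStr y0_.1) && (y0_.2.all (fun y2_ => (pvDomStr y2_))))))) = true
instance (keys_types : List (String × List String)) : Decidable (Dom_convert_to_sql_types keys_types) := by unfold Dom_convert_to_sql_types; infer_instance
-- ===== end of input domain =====

-- B replaces A's single pass with its per-item if/elif cascade by staged passes:
-- it first collects the REAL-typed and INTEGER-typed key sets in two filtering
-- passes, then builds the result by membership in those sets; same O(n) cost.

-- ===== PORT A =====
-- 'types' is a Python set of strings: PySem.Set String (distinct elements);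
-- '==' on sets is PySem.Set.equal, len(types) is the element count.
def convert_to_sql_types (keys_types : List (String × List String)) : List (String × String) :=
  (keys_types.foldl (fun keys_sql_types p =>
      let types := p.2
      let sql_type :=
        if 1 < types.length ∧ ¬ (PySem.Set.equal types ["int", "float"] = true) then "TEXT"
        else if PySem.Set.equal types ["int", "float"] || PySem.Set.equal types ["float"] then "REAL"
        else if PySem.Set.equal types ["int"] || PySem.Set.equal types ["boolean"] then "INTEGER"
        else "TEXT"
      keys_sql_types.insert p.1 sql_type)
    (PySem.Dict.empty : PySem.Dict String String)).items

-- ===== PORT B =====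
-- the two set comprehensions: keys whose type set is REAL-like / INTEGER-like
def convert_to_sql_types_alt (keys_types : List (String × List String)) : List (String × String) :=
  let real_keys : PySem.Set String := PySem.Set.ofList
    ((keys_types.filter fun p =>
        PySem.Set.equal p.2 ["float"] || PySem.Set.equal p.2 ["int", "float"]).map Prod.fst)
  let integer_keys : PySem.Set String := PySem.Set.ofList
    ((keys_types.filter fun p =>
        PySem.Set.equal p.2 ["int"] || PySem.Set.equal p.2 ["boolean"]).map Prod.fst)
  -- the final dict comprehension over the keys
  (keys_types.foldl (fun d p =>
      d.insert p.1
        (if real_keys.contains p.1 then "REAL"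
         else if integer_keys.contains p.1 then "INTEGER"
         else "TEXT"))
    (PySem.Dict.empty : PySem.Dict String String)).items

-- ===== PRECONDITION & SPEC =====
-- The input is a Python dict of key -> set, so Pre_ requires the association-list
-- keys to be distinct and each value list to have distinct elements; a list with
-- duplicate keys or duplicate set elements is not a valid encoding of the Python
-- input (dict/set already collapse duplicates before A sees them), so no
-- behaviour of A is hidden by this.
def Pre_convert_to_sql_types (keys_types : List (String × List String)) : Prop :=
  (keys_types.map Prod.fst).Nodup ∧ ∀ p ∈ keys_types, p.2.Nodup
instance (keys_types : List (String × List String)) : Decidable (Pre_convert_to_sql_types keys_types) := by unfold Pre_convert_to_sql_types; infer_instance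

def pvWitness_convert_to_sql_types : (List (String × List String)) :=
  [("a", ["int", "float"]), ("b", ["str"]), ("c", [])]

def Spec_convert_to_sql_types (keys_types : List (String × List String)) (out : List (String × String)) : Prop := out = convert_to_sql_types_alt keys_types
instance (keys_types : List (String × List String)) (out : List (String × String)) : Decidable (Spec_convert_to_sql_types keys_types out) := by unfold Spec_convert_to_sql_types; infer_instance

-- ===== CLAIM (what is proved, stated in full; the proofs are below) =====
def Claim_equal_convert_to_sql_types : Prop := ∀ (keys_types : List (String × List String)), Dom_convert_to_sql_types keys_types → Pre_convert_to_sql_types keys_types → Spec_convert_to_sql_types keys_types (convert_to_sql_types keys_types)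

-- ===== LEMMAS AND PROOFS =====

-- a Nodup list with more than one element is not set-equal to a singleton
theorem pv_equal_singleton_false {t : List String} (hnd : t.Nodup) (hlen : 1 < t.length)
    (x : String) : PySem.Set.equal t [x] = false := by
  by_contra h
  have h' : PySem.Set.equal t [x] = true := by
    cases hb : PySem.Set.equal t [x] with
    | false => exact absurd hb h
    | true => rfl
  have hall := (PySem.Set.equal_iff (s := t) (t := [x])).mp h'
  match t, hnd with
  | a :: b :: rest, hnd =>
    have ha : a = x := by simpa using (hall a).mp (by simp)
    have hb : b = x := by simpa using (hall b).mp (by simp)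
    have : a ∉ b :: rest := (List.nodup_cons.mp hnd).1
    exact this (by simp [ha, hb])

-- A's cascade agrees with B's REAL-then-INTEGER classification on a Nodup set
theorem pv_branch_eq (t : List String) (hnd : t.Nodup) :
    (if 1 < t.length ∧ ¬ (PySem.Set.equal t ["int", "float"] = true) then "TEXT"
     else if PySem.Set.equal t ["int", "float"] || PySem.Set.equal t ["float"] then "REAL"
     else if PySem.Set.equal t ["int"] || PySem.Set.equal t ["boolean"] then "INTEGER"
     else "TEXT")
    = (if PySem.Set.equal t ["float"] || PySem.Set.equal t ["int", "float"] then "REAL"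
       else if PySem.Set.equal t ["int"] || PySem.Set.equal t ["boolean"] then "INTEGER"
       else "TEXT") := by
  cases h1 : PySem.Set.equal t ["int", "float"] with
  | true => simp
  | false =>
    by_cases hlen : 1 < t.length
    · have h2 := pv_equal_singleton_false hnd hlen "float"
      have h3 := pv_equal_singleton_false hnd hlen "int"
      have h4 := pv_equal_singleton_false hnd hlen "boolean"
      simp [h2, h3, h4, hlen]
    · cases h2 : PySem.Set.equal t ["float"] with
      | true => simp [hlen, h2]
      | false => simp [hlen]

-- membership of p.1 in a filtered key set decides the condition on p.2 (Nodup keys)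
theorem pv_mem_filter_keys (l : List (String × List String))
    (hk : (l.map Prod.fst).Nodup) (c : String × List String → Bool)
    (p : String × List String) (hp : p ∈ l) :
    ((PySem.Set.ofList ((l.filter c).map Prod.fst)).contains p.1) = c p := by
  cases hc : c p with
  | true =>
    have hmem : p.1 ∈ PySem.Set.ofList ((l.filter c).map Prod.fst) :=
      (PySem.Set.mem_ofList _ _).mpr (List.mem_map_of_mem (List.mem_filter.mpr ⟨hp, hc⟩))
    simpa [List.contains_iff_mem] using hmem
  | false =>
    by_contra hne
    have hb : (PySem.Set.ofList ((l.filter c).map Prod.fst)).contains p.1 = true := by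
      cases h : (PySem.Set.ofList ((l.filter c).map Prod.fst)).contains p.1 with
      | true => rfl
      | false => exact absurd h hne
    have hmem := (PySem.Set.mem_ofList _ _).mp (List.contains_iff_mem.mp hb)
    simp only [List.mem_map, List.mem_filter] at hmem
    obtain ⟨q, ⟨hql, hqc⟩, hqa⟩ := hmem
    have : q = p := List.inj_on_of_nodup_map hk hql hp hqa
    subst this
    rw [hc] at hqc; exact absurd hqc (by simp)

-- ===== VERDICT (by name: the statement is the Claim_ definition above) =====
theorem convert_to_sql_types_spec : Claim_equal_convert_to_sql_types := by
  intro keys_types _ hpre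
  obtain ⟨hk, hv⟩ := hpre
  unfold Spec_convert_to_sql_types convert_to_sql_types convert_to_sql_types_alt
  rw [PySem.Dict.items_foldl_insert_fresh _ _ _ _
        (fun a _ => PySem.Dict.contains_empty a.1) hk,
      PySem.Dict.items_foldl_insert_fresh _ _ _ _
        (fun a _ => PySem.Dict.contains_empty a.1) hk]
  have hempty : (PySem.Dict.empty : PySem.Dict String String).items = [] := rfl
  simp only [hempty, List.nil_append]
  apply List.map_congr_left
  intro p hp
  have hreal := pv_mem_filter_keys keys_types hk
      (fun q => PySem.Set.equal q.2 ["float"] || PySem.Set.equal q.2 ["int", "float"]) p hp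
  have hint := pv_mem_filter_keys keys_types hk
      (fun q => PySem.Set.equal q.2 ["int"] || PySem.Set.equal q.2 ["boolean"]) p hp
  rw [hreal, hint, pv_branch_eq p.2 (hv p hp)]
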